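-- pv_equiv track=rewrite | github.com/madhugovind28/sec-rag | src/indexing.py | _identity_fallback
-- ===== SOURCE A (Python) =====
-- from typing import Dict, List
--
-- def _identity_fallback(chunks: List[Dict]) -> str:
--     preferred = []
--     for chunk in chunks:
--         title = (chunk.get("section_title") or "").lower()
--         if any(k in title for k in ["business", "management", "discussion", "analysis", "md&a"]):
--             preferred.append(chunk)
--     if not preferred:
--         preferred = chunks[:3]
--     preferred.sort(key=lambda c: (c.get("filing_date", ""), len(c.get("text", ""))), reverse=True)
--     return "\n\n".join(c.get("text", "")[:450] for c in preferred[:2])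
-- ===== SOURCE B (Python) =====
-- from typing import Dict, List
--
-- def _identity_fallback(chunks: List[Dict]) -> str:
--     kws = ("business", "management", "discussion", "analysis", "md&a")
--     preferred = [c for c in chunks
--                  if any(k in (c.get("section_title") or "").lower() for k in kws)] or chunks[:3]
--     # single-pass top-2 selection instead of a full sort
--     best = None
--     second = None
--     for c in preferred:
--         key = (c.get("filing_date", ""), len(c.get("text", "")))
--         if best is None or key > best[0]:
--             second, best = best, (key, c)
--         elif second is None or key > second[0]:
--             second = (key, c)
--     parts = []
--     if best is not None:
--         parts.append(best[1].get("text", "")[:450])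
--     if second is not None:
--         parts.append(second[1].get("text", "")[:450])
--     return "\n\n".join(parts)
-- ===== Notes on version B (the rewrite author's own statement) =====
-- stated objective: alternative
-- what changed: Replaces the full stable reverse sort of the preferred chunks with a single-pass top-2 selection scan (tracking best and second-best by the same (filing_date, len(text)) key with strict comparisons, which preserves the stable-sort tie order), and builds the filtered list with a comprehension plus 'or' fallback.
import Mathlib
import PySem

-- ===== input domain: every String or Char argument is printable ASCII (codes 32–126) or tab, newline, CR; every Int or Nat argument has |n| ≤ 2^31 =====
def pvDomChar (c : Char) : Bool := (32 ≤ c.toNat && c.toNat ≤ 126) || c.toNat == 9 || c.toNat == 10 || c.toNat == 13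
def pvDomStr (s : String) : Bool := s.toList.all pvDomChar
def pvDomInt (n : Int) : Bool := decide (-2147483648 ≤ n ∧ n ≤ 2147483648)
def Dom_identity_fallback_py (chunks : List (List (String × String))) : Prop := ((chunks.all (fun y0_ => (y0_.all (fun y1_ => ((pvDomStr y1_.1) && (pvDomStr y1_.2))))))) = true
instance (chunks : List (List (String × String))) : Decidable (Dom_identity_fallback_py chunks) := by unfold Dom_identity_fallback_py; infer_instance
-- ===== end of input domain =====

-- B replaces A's full stable reverse sort by a single-pass top-2 selection scan (alternative algorithm, same result).

-- ===== PORT A =====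
-- dict.get(k) or dict.get(k, "") on an association list: first-match lookup, default ""
def pvGetS (c : List (String × String)) (k : String) : String :=
  (PySem.Dict.mk c).getD k ""

def identity_fallback_py (chunks : List (List (String × String))) : String :=
  let preferred := chunks.foldl (fun acc chunk =>
    let title := PySem.Str.lower (pvGetS chunk "section_title")
    if ["business", "management", "discussion", "analysis", "md&a"].any
        (fun k => PySem.Str.isIn k title)
    then acc ++ [chunk] else acc) []
  let preferred := if preferred = [] then PySem.List.slice chunks none (some 3) else preferred
  let preferred := PySem.List.sorted2 preferred
      (fun c => pvGetS c "filing_date")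
      (fun c => PySem.Str.len (pvGetS c "text")) true
  PySem.Str.join "\n\n" ((PySem.List.slice preferred none (some 2)).map
      (fun c => PySem.Str.slice (pvGetS c "text") none (some 450)))

-- ===== PORT B =====
-- the Python tuple key (c.get("filing_date",""), len(c.get("text","")))
def pvKey (c : List (String × String)) : String × Int :=
  (pvGetS c "filing_date", PySem.Str.len (pvGetS c "text"))

-- Python 'p > q' on (str, int) tuples
def pvPairGt (p q : String × Int) : Bool :=
  decide (q.1 < p.1) || (!decide (p.1 < q.1) && decide (q.2 < p.2))

-- one iteration of B's best/second scan
def pvStep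
    (st : Option ((String × Int) × List (String × String)) ×
          Option ((String × Int) × List (String × String)))
    (c : List (String × String)) :
    Option ((String × Int) × List (String × String)) ×
    Option ((String × Int) × List (String × String)) :=
  let key := pvKey c
  match st with
  | (none, s) => (some (key, c), s)
  | (some b, s) =>
    if pvPairGt key b.1 then (some (key, c), some b)
    else
      match s with
      | none => (some b, some (key, c))
      | some s' => if pvPairGt key s'.1 then (some b, some (key, c)) else (some b, some s')

def pvTrunc (c : List (String × String)) : String :=
  PySem.Str.slice (pvGetS c "text") none (some 450)

def identity_fallback_py_alt (chunks : List (List (String × String))) : String :=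
  let preferred := chunks.filter (fun c =>
      ["business", "management", "discussion", "analysis", "md&a"].any
        (fun k => PySem.Str.isIn k (PySem.Str.lower (pvGetS c "section_title"))))
  let preferred := if preferred = [] then PySem.List.slice chunks none (some 3) else preferred
  let st := preferred.foldl pvStep (none, none)
  let parts := (match st.1 with | some b => [pvTrunc b.2] | none => []) ++
               (match st.2 with | some s => [pvTrunc s.2] | none => [])
  PySem.Str.join "\n\n" parts

-- ===== PRECONDITION & SPEC =====
def Spec_identity_fallback_py (chunks : List (List (String × String))) (out : String) : Prop := out = identity_fallback_py_alt chunks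
instance (chunks : List (List (String × String))) (out : String) : Decidable (Spec_identity_fallback_py chunks out) := by unfold Spec_identity_fallback_py; infer_instance

-- ===== CLAIM (what is proved, stated in full; the proofs are below) =====
def Claim_equal_identity_fallback_py : Prop := ∀ (chunks : List (List (String × String))), Dom_identity_fallback_py chunks → Spec_identity_fallback_py chunks (identity_fallback_py chunks)

-- ===== LEMMAS AND PROOFS =====

-- the comparator sorted2 … true uses when inserting x in front of y
def pvBfr (a b : List (String × String)) : Bool := pvPairGt (pvKey a) (pvKey b)

-- A's sort, written as the insertion fold it is by definition
def pvSortRev (l : List (List (String × String))) : List (List (String × String)) :=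
  l.foldl (fun acc x => PySem.List.insertBy pvBfr x acc) []

lemma pvSorted2_eq (l : List (List (String × String))) :
    PySem.List.sorted2 l (fun c => pvGetS c "filing_date")
      (fun c => PySem.Str.len (pvGetS c "text")) true = pvSortRev l := rfl

-- take 2 of an insertion only depends on take 2 of the list
lemma pvTake2_insertBy (x : List (String × String)) (s : List (List (String × String))) :
    (PySem.List.insertBy pvBfr x s).take 2 =
      (match s.take 2 with
       | [] => [x]
       | [a] => if pvBfr x a then [x, a] else [a, x]
       | a :: b :: _ => if pvBfr x a then [x, a]
                        else if pvBfr x b then [a, x] else [a, b]) := by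
  match s with
  | [] => simp [PySem.List.insertBy]
  | [a] => by_cases h : pvBfr x a = true <;> simp [PySem.List.insertBy, h]
  | a :: b :: t =>
    by_cases h1 : pvBfr x a = true
    · simp [PySem.List.insertBy, h1]
    · by_cases h2 : pvBfr x b = true <;> simp [PySem.List.insertBy, h1, h2]

-- invariant of B's scan: the state is exactly take 2 of A's sorted list
lemma pvScan_inv (l : List (List (String × String))) :
    l.foldl pvStep (none, none) =
      (match (pvSortRev l).take 2 with
       | [] => (none, none)
       | [a] => (some (pvKey a, a), none)
       | a :: b :: _ => (some (pvKey a, a), some (pvKey b, b))) := by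
  induction l using List.reverseRecOn with
  | nil => simp [pvSortRev]
  | append_singleton l x ih =>
    have hsort : pvSortRev (l ++ [x]) = PySem.List.insertBy pvBfr x (pvSortRev l) := by
      simp [pvSortRev]
    rw [List.foldl_append, ih, hsort, List.foldl_cons, List.foldl_nil, pvTake2_insertBy]
    rcases h : (pvSortRev l).take 2 with _ | ⟨a, _ | ⟨b, t⟩⟩ <;>
      simp only [pvStep, pvBfr] <;> split_ifs <;> rfl

lemma pvTake2_len (l : List (List (String × String))) (a b : List (String × String))
    (t : List (List (String × String))) (h : (pvSortRev l).take 2 = a :: b :: t) : t = [] := by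
  have := congrArg List.length h
  simp only [List.length_take, List.length_cons] at this
  have : t.length = 0 := by omega
  exact List.eq_nil_of_length_eq_zero this

-- the top-2 tail of both programs agree on any intermediate list
lemma pvTop2 (pref : List (List (String × String))) :
    PySem.Str.join "\n\n" ((PySem.List.slice (pvSortRev pref) none (some 2)).map
        (fun c => PySem.Str.slice (pvGetS c "text") none (some 450))) =
    PySem.Str.join "\n\n"
      ((match (pref.foldl pvStep (none, none)).1 with | some b => [pvTrunc b.2] | none => []) ++
       (match (pref.foldl pvStep (none, none)).2 with | some s => [pvTrunc s.2] | none => [])) := by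
  have hslice : PySem.List.slice (pvSortRev pref) none (some 2) = (pvSortRev pref).take 2 := by
    simpa using PySem.List.slice_to (xs := pvSortRev pref) (b := 2) (by norm_num)
  rw [hslice, pvScan_inv]
  rcases h : (pvSortRev pref).take 2 with _ | ⟨a, _ | ⟨b, t⟩⟩
  · rfl
  · rfl
  · rw [pvTake2_len pref a b t h]; rfl

-- ===== VERDICT (by name: the statement is the Claim_ definition above) =====
theorem identity_fallback_py_spec : Claim_equal_identity_fallback_py := by
  intro chunks _
  show identity_fallback_py chunks = identity_fallback_py_alt chunks
  have hfil : chunks.foldl (fun acc chunk =>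
      let title := PySem.Str.lower (pvGetS chunk "section_title")
      if ["business", "management", "discussion", "analysis", "md&a"].any
          (fun k => PySem.Str.isIn k title)
      then acc ++ [chunk] else acc) [] =
      chunks.filter (fun c =>
        ["business", "management", "discussion", "analysis", "md&a"].any
          (fun k => PySem.Str.isIn k (PySem.Str.lower (pvGetS c "section_title")))) := by
    simpa using PySem.List.foldl_append_if_eq_filter
      (p := fun c => ["business", "management", "discussion", "analysis", "md&a"].any
          (fun k => PySem.Str.isIn k (PySem.Str.lower (pvGetS c "section_title"))))
      (l := chunks) (acc := [])
  simp only [identity_fallback_py, identity_fallback_py_alt, hfil, pvSorted2_eq]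
  exact pvTop2 _
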